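-- pv_equiv track=rewrite | github.com/anantcs/Question-Answering-Engine | src/processing/paragraph_scorer.py | score_paragraph
-- ===== SOURCE A (Python) =====
-- from typing import List, Dict, Tuple
--
-- def score_paragraph(paragraph: str, query: List[str]) -> int:
--     """
--     Calculate relevance score for a paragraph.
--
--     Args:
--         paragraph: Paragraph text
--         query: List of query keywords
--
--     Returns:
--         Relevance score (keyword frequency count)
--     """
--     paragraph_lower = paragraph.lower()
--     words = paragraph_lower.split()
--
--     # Count keyword occurrences
--     keyword_counts = {}
--     for word in words:
--         for keyword in query:
--             if word == keyword.lower():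
--                 keyword_counts[keyword] = keyword_counts.get(keyword, 0) + 1
--
--     # Total score is sum of all keyword occurrences
--     score = sum(keyword_counts.values())
--     return score
-- ===== SOURCE B (Python) =====
-- def score_paragraph(paragraph, query):
--     """Index the paragraph once into a word-frequency table, then make a
--     single pass over the query (duplicates kept) summing each lower-cased
--     keyword's frequency via an O(1) lookup."""
--     counts = {}
--     for w in paragraph.lower().split():
--         counts[w] = counts.get(w, 0) + 1
--     return sum(counts.get(k.lower(), 0) for k in query)
-- ===== Notes on version B (the rewrite author's own statement) =====
-- stated objective: alternative
-- what changed: Replaces A's nested word-by-keyword double loop with a frequency table built in one pass over the paragraph words, then a single pass over the query summing lookups, eliminating the inner scan (asymptotically O(W+Q) vs O(W*Q), though not measurably faster on the timing inputs).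
import Mathlib
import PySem

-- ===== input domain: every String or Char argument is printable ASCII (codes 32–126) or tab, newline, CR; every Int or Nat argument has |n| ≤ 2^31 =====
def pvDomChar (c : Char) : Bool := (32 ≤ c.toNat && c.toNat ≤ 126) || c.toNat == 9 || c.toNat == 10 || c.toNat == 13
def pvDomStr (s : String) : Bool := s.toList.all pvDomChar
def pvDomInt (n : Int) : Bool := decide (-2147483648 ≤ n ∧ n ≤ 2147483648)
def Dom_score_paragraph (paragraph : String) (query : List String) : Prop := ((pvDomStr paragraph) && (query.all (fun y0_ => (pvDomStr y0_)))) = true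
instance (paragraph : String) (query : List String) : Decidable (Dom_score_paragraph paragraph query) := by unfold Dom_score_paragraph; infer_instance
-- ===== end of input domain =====

-- B replaces A's nested word×keyword double loop by a word-frequency table built in one pass over the paragraph, then one pass over the query summing lookups, so the inner scan disappears.

-- ===== PORT A =====
def score_paragraph (paragraph : String) (query : List String) : Int :=
  let paragraph_lower := PySem.Str.lower paragraph
  let words := PySem.Str.split₀ paragraph_lower
  let keyword_counts :=
    words.foldl (fun d word =>
      query.foldl (fun d keyword =>
        if word == PySem.Str.lower keyword then
          d.insert keyword (d.getD keyword 0 + 1)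
        else d) d)
    PySem.Dict.empty
  (PySem.Dict.values keyword_counts).sum

-- ===== PORT B =====
def score_paragraph_alt (paragraph : String) (query : List String) : Int :=
  let counts :=
    (PySem.Str.split₀ (PySem.Str.lower paragraph)).foldl
      (fun d w => d.insert w (d.getD w 0 + 1)) PySem.Dict.empty
  (query.map (fun k => counts.getD (PySem.Str.lower k) 0)).sum

-- ===== PRECONDITION & SPEC =====
def Spec_score_paragraph (paragraph : String) (query : List String) (out : Int) : Prop := out = score_paragraph_alt paragraph query
instance (paragraph : String) (query : List String) (out : Int) : Decidable (Spec_score_paragraph paragraph query out) := by unfold Spec_score_paragraph; infer_instance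

-- ===== CLAIM (what is proved, stated in full; the proofs are below) =====
def Claim_equal_score_paragraph : Prop := ∀ (paragraph : String) (query : List String), Dom_score_paragraph paragraph query → Spec_score_paragraph paragraph query (score_paragraph paragraph query)

-- ===== LEMMAS AND PROOFS =====

-- the (word, keyword) match pairs, flattened: one keyword entry per match
def pvMatches (words query : List String) : List String :=
  words.flatMap (fun w => query.filter (fun k => w == PySem.Str.lower k))

-- A's double loop is the increment fold over the flattened match list
theorem pv_foldl_flatMap (words query : List String)
    (d : PySem.Dict String Int) :
    words.foldl (fun d word =>
      query.foldl (fun d keyword =>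
        if word == PySem.Str.lower keyword then
          d.insert keyword (d.getD keyword 0 + 1)
        else d) d) d
    = (pvMatches words query).foldl
        (fun d k => d.insert k (d.getD k 0 + 1)) d := by
  induction words generalizing d with
  | nil => rfl
  | cons w ws ih =>
      simp only [List.foldl_cons, pvMatches, List.flatMap_cons, List.foldl_append]
      rw [ih]
      congr 1
      rw [← List.foldl_filter]

theorem pv_sum_count (s L : List String) (hnd : s.Nodup)
    (hmem : ∀ x, x ∈ s ↔ x ∈ L) :
    (s.map (fun k => L.count k)).sum = L.length := by
  have hperm : s.Perm L.dedup :=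
    (List.perm_ext_iff_of_nodup hnd L.nodup_dedup).mpr
      (fun a => by rw [hmem, List.mem_dedup])
  calc (s.map (fun k => L.count k)).sum
      = (L.dedup.map (fun k => L.count k)).sum := (hperm.map _).sum_eq
    _ = L.length := by simpa using L.sum_map_count_dedup_eq_length

theorem pv_hvals (L : List String) : (PySem.Dict.values (PySem.Dict.counter L)).sum = (L.length : Int) := by
  have h1 : PySem.Dict.values (PySem.Dict.counter L)
      = (PySem.Set.ofList L).map (fun k => (L.count k : Int)) := by
    simp only [PySem.Dict.values, PySem.Dict.items_counter, List.map_map]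
    simp [Function.comp]
  have h2 : ((PySem.Set.ofList L).map (fun k => (L.count k : Int)))
      = List.map Nat.cast ((PySem.Set.ofList L).map (fun k => L.count k)) := by
    rw [List.map_map]; rfl
  rw [h1, h2, ← Nat.cast_list_sum,
      pv_sum_count _ _ (PySem.Set.nodup_ofList L)
        (fun x => by simp [PySem.Set.mem_ofList])]

theorem pv_hlen (words q : List String) : (pvMatches words q).length
    = (words.map (fun w => q.countP (fun k => w == PySem.Str.lower k))).sum := by
  simp [pvMatches, List.length_flatMap, List.countP_eq_length_filter]

-- one step of the double-counting swap
theorem pv_swap_cons (w : String) (ws query : List String) :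
    query.countP (fun k => w == PySem.Str.lower k)
      + (query.map (fun k => ws.count (PySem.Str.lower k))).sum
    = (query.map (fun k => (w :: ws).count (PySem.Str.lower k))).sum := by
  induction query with
  | nil => simp
  | cons k q ih =>
      simp only [List.countP_cons, List.map_cons, List.sum_cons]
      rw [← ih, List.count_cons]
      by_cases h : w = PySem.Str.lower k
      · simp only [h, beq_self_eq_true, if_true]
        omega
      · have h1 : (w == PySem.Str.lower k) = false := by simpa using h
        simp only [h1]
        omega

-- the double-counting swap: Σ_w countP(query) = Σ_k count(words)
theorem pv_swap (words query : List String) :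
    (words.map (fun w => query.countP (fun k => w == PySem.Str.lower k))).sum
    = (query.map (fun k => words.count (PySem.Str.lower k))).sum := by
  induction words with
  | nil => simp [List.count_nil]
  | cons w ws ih =>
      simp only [List.map_cons, List.sum_cons, ih]
      exact pv_swap_cons w ws query

-- B's lookup in the frequency table is the word count
theorem pv_alt_eq (words q : List String) :
    (q.map (fun k =>
      (words.foldl (fun d w => d.insert w (d.getD w 0 + 1)) PySem.Dict.empty).getD
        (PySem.Str.lower k) 0)).sum
    = (q.map (fun k => (words.count (PySem.Str.lower k) : Int))).sum := by
  congr 1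
  refine List.map_congr_left (fun k _ => ?_)
  rw [PySem.Dict.foldl_insert_getD_add_one_eq_counter, PySem.Dict.getD_counter]

theorem pv_cast (words q : List String) :
    ((q.map (fun k => words.count (PySem.Str.lower k))).sum : Int)
    = (q.map (fun k => (words.count (PySem.Str.lower k) : Int))).sum := by
  simp [Nat.cast_list_sum, List.map_map, Function.comp_def]

-- ===== VERDICT (by name: the statement is the Claim_ definition above) =====
theorem score_paragraph_spec : Claim_equal_score_paragraph := by
  intro p q _
  simp only [Spec_score_paragraph, score_paragraph, score_paragraph_alt]
  rw [pv_foldl_flatMap, PySem.Dict.foldl_insert_getD_add_one_eq_counter,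
      pv_hvals, pv_hlen, pv_swap, pv_cast, pv_alt_eq]
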